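-- pv_equiv track=rewrite | github.com/Stars1233/nvalchemi-toolkit-ops | nvalchemiops/segment_ops.py | compute_ept
-- ===== SOURCE A (Python) =====
-- def compute_ept(N: int, sm_count: int, is_vec3: bool) -> int:
--     """Return the elements-per-thread (EPT) for segmented reduction kernels.
--
--     The value is derived from *N* (total element count) and the GPU's
--     streaming-multiprocessor count so that the grid neither under- nor
--     over-subscribes the device.  The raw ratio ``N / (sm_count * 512)``
--     is rounded to the nearest power of two (rounding down on a tie) and
--     then clamped to ``[ept_min, ept_max]``.
--
--     Parameters
--     ----------
--     N : int
--         Total number of elements to reduce.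
--     sm_count : int
--         Number of streaming multiprocessors on the target device.
--     is_vec3 : bool
--         If ``True`` the reduction operates on vec3 data; limits are
--         tighter (``ept_min=2, ept_max=8``) than for scalars
--         (``ept_min=4, ept_max=16``).
--
--     Returns
--     -------
--     int
--         Optimal elements-per-thread, guaranteed to be a power of two
--         within ``[ept_min, ept_max]``.
--     """
--     w_fill = sm_count * 512
--     ept_max = 8 if is_vec3 else 16
--     ept_min = 2 if is_vec3 else 4
--     ept = max(1, N // w_fill)
--     p = 1
--     while p < ept:
--         p <<= 1
--     if p > 1 and (p - ept) > (ept - (p >> 1)):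
--         p >>= 1
--     return max(ept_min, min(p, ept_max))
-- ===== SOURCE B (Python) =====
-- def compute_ept(N: int, sm_count: int, is_vec3: bool) -> int:
--     """Closed-form version: the loop+tie-break equals 2**((2*ept)//3).bit_length()."""
--     ept = max(1, N // (sm_count * 512))
--     p = 2 ** ((2 * ept) // 3).bit_length()
--     lo, hi = (2, 8) if is_vec3 else (4, 16)
--     return min(max(p, lo), hi)
-- ===== Notes on version B (the rewrite author's own statement) =====
-- stated objective: simpler
-- what changed: The doubling loop plus explicit tie-break branch is replaced by the single closed form 2**((2*ept)//3).bit_length(), which yields the tie-rounded-down nearest power of two directly; the clamp is written as min(max(...)).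
import Mathlib
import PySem

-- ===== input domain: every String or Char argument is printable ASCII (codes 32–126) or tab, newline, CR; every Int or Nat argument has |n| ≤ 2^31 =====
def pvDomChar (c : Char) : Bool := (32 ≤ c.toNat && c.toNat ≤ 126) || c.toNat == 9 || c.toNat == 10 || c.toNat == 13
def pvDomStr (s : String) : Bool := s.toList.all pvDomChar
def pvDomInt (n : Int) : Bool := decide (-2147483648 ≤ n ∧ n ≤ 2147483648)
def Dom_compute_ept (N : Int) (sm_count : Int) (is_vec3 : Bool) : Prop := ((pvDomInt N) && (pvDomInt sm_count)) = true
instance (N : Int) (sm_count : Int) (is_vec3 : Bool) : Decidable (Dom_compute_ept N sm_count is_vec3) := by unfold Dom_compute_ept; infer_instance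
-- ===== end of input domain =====

-- B replaces A's doubling loop and tie-break branch with the closed form 2^bit_length((2*ept)//3); same clamp.

-- ===== PORT A =====
-- `while p < ept: p <<= 1`; the `1 ≤ p` guard only makes the recursion total
-- (p starts at 1 and only doubles, so the guard always holds at every call from the port).
def growLoop (ept p : Int) : Int :=
  if h : 1 ≤ p ∧ p < ept then growLoop ept (p * 2) else p
termination_by (ept - p).toNat
decreasing_by omega

def compute_ept (N : Int) (sm_count : Int) (is_vec3 : Bool) : Int :=
  let w_fill := sm_count * 512
  let ept_max : Int := if is_vec3 then 8 else 16
  let ept_min : Int := if is_vec3 then 2 else 4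
  let ept := max 1 (PySem.Int.floordiv N w_fill)
  let p := growLoop ept 1
  -- Python `p >> 1` on the positive int p is `p // 2`
  let p2 := if 1 < p ∧ p - ept > ept - PySem.Int.floordiv p 2 then PySem.Int.floordiv p 2 else p
  max ept_min (min p2 ept_max)

-- ===== PORT B =====
-- `2 ** k` ported as `(2:Int) ^ k`; `.bit_length()` is PySem.Int.bitLength.
def compute_ept_alt (N : Int) (sm_count : Int) (is_vec3 : Bool) : Int :=
  let ept := max 1 (PySem.Int.floordiv N (sm_count * 512))
  let p : Int := 2 ^ PySem.Int.bitLength (PySem.Int.floordiv (2 * ept) 3)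
  let lohi : Int × Int := if is_vec3 then (2, 8) else (4, 16)
  min (max p lohi.1) lohi.2

-- ===== PRECONDITION & SPEC =====
-- Pre_ excludes exactly sm_count = 0, where Python A raises ZeroDivisionError (and B raises too).
def Pre_compute_ept (N : Int) (sm_count : Int) (is_vec3 : Bool) : Prop := sm_count ≠ 0
instance (N : Int) (sm_count : Int) (is_vec3 : Bool) : Decidable (Pre_compute_ept N sm_count is_vec3) := by unfold Pre_compute_ept; infer_instance
def pvWitness_compute_ept : Int × Int × Bool := (100000, 4, false)

def Spec_compute_ept (N : Int) (sm_count : Int) (is_vec3 : Bool) (out : Int) : Prop := out = compute_ept_alt N sm_count is_vec3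
instance (N : Int) (sm_count : Int) (is_vec3 : Bool) (out : Int) : Decidable (Spec_compute_ept N sm_count is_vec3 out) := by unfold Spec_compute_ept; infer_instance

-- ===== CLAIM (what is proved, stated in full; the proofs are below) =====
def Claim_equal_compute_ept : Prop := ∀ (N : Int) (sm_count : Int) (is_vec3 : Bool), Dom_compute_ept N sm_count is_vec3 → Pre_compute_ept N sm_count is_vec3 → Spec_compute_ept N sm_count is_vec3 (compute_ept N sm_count is_vec3)

-- ===== LEMMAS AND PROOFS =====

-- bitLength from a two-power bracket
lemma bitLength_eq_of (n : Int) (k : Nat) (h1 : 2 ^ k ≤ n.natAbs) (h2 : n.natAbs < 2 ^ (k + 1)) :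
    PySem.Int.bitLength n = k + 1 := by
  have hne : n ≠ 0 := by
    intro h
    subst h
    rw [show (0:Int).natAbs = 0 from rfl] at h1
    have := Nat.two_pow_pos k
    omega
  have hu := PySem.Int.lt_two_pow_bitLength n
  have hl := PySem.Int.two_pow_bitLength_le n hne
  by_contra hne2
  rcases Nat.lt_or_ge (PySem.Int.bitLength n) (k + 1) with hlt | hge
  · have := Nat.pow_le_pow_right (by norm_num : 1 ≤ 2) (Nat.le_of_lt_succ hlt)
    omega
  · have hge' : k + 1 ≤ PySem.Int.bitLength n - 1 := by omega
    have := Nat.pow_le_pow_right (by norm_num : 1 ≤ 2) hge'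
    omega

lemma grow_pow (e : Int) (he : 1 ≤ e) (k : Nat) :
    growLoop e ((2:Int) ^ k) = 2 ^ (max k (PySem.Int.bitLength (e - 1))) := by
  have h1 : (1:Int) ≤ 2 ^ k := one_le_pow₀ (by norm_num)
  rw [growLoop]
  by_cases h : (2:Int) ^ k < e
  · rw [dif_pos ⟨h1, h⟩]
    have hp : (2:Int) ^ k * 2 = 2 ^ (k + 1) := by ring
    rw [hp, grow_pow e he (k + 1)]
    congr 1
    have hb : k + 1 ≤ PySem.Int.bitLength (e - 1) := by
      by_contra hc
      rw [not_le] at hc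
      have hle : PySem.Int.bitLength (e - 1) ≤ k := by omega
      have := Nat.pow_le_pow_right (by norm_num : 1 ≤ 2) hle
      have hu := PySem.Int.lt_two_pow_bitLength (e - 1)
      have habs : (e - 1).natAbs = (e - 1).toNat := by omega
      have hcast : ((2 ^ k : Nat) : Int) = (2:Int) ^ k := by push_cast; ring
      omega
    omega
  · rw [dif_neg (by tauto)]
    congr 1
    have hb : PySem.Int.bitLength (e - 1) ≤ k := by
      by_cases hz : e - 1 = 0
      · rw [hz]; simp
      · have hl := PySem.Int.two_pow_bitLength_le (e - 1) hz
        by_contra hc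
        rw [not_le] at hc
        have hge : k ≤ PySem.Int.bitLength (e - 1) - 1 := by omega
        have := Nat.pow_le_pow_right (by norm_num : 1 ≤ 2) hge
        have habs : (e - 1).natAbs = (e - 1).toNat := by omega
        have hcast : ((2 ^ k : Nat) : Int) = (2:Int) ^ k := by push_cast; ring
        omega
    omega
termination_by (e - 2 ^ k).toNat
decreasing_by
  omega

-- loop + tie-break = closed form
lemma final_eq (e : Int) (he : 1 ≤ e) :
    (if 1 < growLoop e 1 ∧ growLoop e 1 - e > e - PySem.Int.floordiv (growLoop e 1) 2 then
       PySem.Int.floordiv (growLoop e 1) 2 else growLoop e 1)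
    = 2 ^ PySem.Int.bitLength (PySem.Int.floordiv (2 * e) 3) := by
  have hg : growLoop e 1 = 2 ^ PySem.Int.bitLength (e - 1) := by
    have := grow_pow e he 0
    simpa using this
  by_cases he1 : e = 1
  · subst he1
    norm_num [hg]
  · -- e ≥ 2
    have he2 : 2 ≤ e := by omega
    have hz : e - 1 ≠ 0 := by omega
    have hu := PySem.Int.lt_two_pow_bitLength (e - 1)
    have hl := PySem.Int.two_pow_bitLength_le (e - 1) hz
    obtain ⟨s, hs⟩ : ∃ s, PySem.Int.bitLength (e - 1) = s := ⟨_, rfl⟩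
    rw [hs] at hu hl hg
    have hs1 : 1 ≤ s := by
      by_contra hc
      have h0 : s = 0 := by omega
      rw [h0, pow_zero] at hu
      omega
    obtain ⟨t, ht⟩ : ∃ t, s = t + 1 := ⟨s - 1, by omega⟩
    have habs : (e - 1).natAbs = (e - 1).toNat := by omega
    -- bracket for e : 2^t < e ≤ 2^(t+1), over Int
    have hcast : ∀ j : Nat, ((2 ^ j : Nat) : Int) = (2:Int) ^ j := by
      intro j; push_cast; ring
    have hlo : (2:Int) ^ t < e := by
      rw [ht] at hl; simp only [Nat.add_sub_cancel] at hl
      have := hcast t; omega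
    have hhi : e ≤ (2:Int) ^ (t + 1) := by
      rw [ht] at hu
      have := hcast (t + 1); omega
    have hgp : growLoop e 1 = 2 ^ (t + 1) := by rw [hg, ht]
    have hp1 : (1:Int) ≤ 2 ^ t := one_le_pow₀ (by norm_num)
    have hp2 : (2:Int) ^ (t + 1) = 2 ^ t * 2 := by ring
    have hhalf : PySem.Int.floordiv ((2:Int) ^ (t + 1)) 2 = 2 ^ t := by
      rw [PySem.Int.floordiv_eq_iff_of_pos (by norm_num)]
      constructor <;> [omega; omega]
    -- m = (2e)//3
    set m := PySem.Int.floordiv (2 * e) 3 with hm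
    have hm3 : m * 3 ≤ 2 * e ∧ 2 * e < (m + 1) * 3 := by
      rw [hm, ← PySem.Int.floordiv_eq_iff_of_pos (by norm_num)]
    have hm0 : 0 ≤ m := by nlinarith [hm3.1, hm3.2]
    have hmabs : (m.natAbs : Int) = m := by omega
    rw [hgp, hhalf]
    by_cases hcond : (1:Int) < 2 ^ (t + 1) ∧ 2 ^ (t + 1) - e > e - 2 ^ t
    · rw [if_pos hcond]
      -- 2e < 3·2^t ; show bitLength m = t, i.e. 2^(t-1) ≤ m < 2^t with t ≥ 1
      have h2e : 2 * e < 3 * 2 ^ t := by omega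
      have ht1 : 1 ≤ t := by
        by_contra hc
        have : t = 0 := by omega
        subst this; simp at hlo h2e; omega
      obtain ⟨u, hu'⟩ : ∃ u, t = u + 1 := ⟨t - 1, by omega⟩
      have hpu : (2:Int) ^ t = 2 ^ u * 2 := by rw [hu']; ring
      have hmlo : (2:Int) ^ u ≤ m := by nlinarith [hm3.2, hlo]
      have hmhi : m < (2:Int) ^ t := by nlinarith [hm3.1, h2e]
      have hb : PySem.Int.bitLength m = u + 1 := by
        apply bitLength_eq_of
        · have := hcast u; omega
        · have := hcast (u + 1)
          have : ((2 ^ (u+1) : Nat) : Int) = (2:Int) ^ (u+1) := hcast (u+1)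
          have hq : (2:Int) ^ (u + 1) = 2 ^ u * 2 := by ring
          omega
      rw [hb, ← hu']
    · rw [if_neg hcond]
      -- 2e ≥ 3·2^t ; show bitLength m = t+1, i.e. 2^t ≤ m < 2^(t+1)
      have h2e : 3 * 2 ^ t ≤ 2 * e := by
        rw [not_and_or, not_lt, not_lt] at hcond
        omega
      have hmlo : (2:Int) ^ t ≤ m := by nlinarith [hm3.2]
      have hmhi : m < (2:Int) ^ (t + 1) := by nlinarith [hm3.1, hhi]
      have hb : PySem.Int.bitLength m = t + 1 := by
        apply bitLength_eq_of
        · have := hcast t; omega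
        · have := hcast (t + 1); omega
      rw [hb]

lemma clamp_comm (p lo hi : Int) (h : lo ≤ hi) : max lo (min p hi) = min (max p lo) hi := by
  omega

-- ===== VERDICT (by name: the statement is the Claim_ definition above) =====
theorem compute_ept_spec : Claim_equal_compute_ept := by
  intro N sm_count is_vec3 _ _
  unfold Spec_compute_ept compute_ept compute_ept_alt
  set e := max 1 (PySem.Int.floordiv N (sm_count * 512)) with hedef
  have he : 1 ≤ e := le_max_left _ _
  have hfe := final_eq e he
  cases is_vec3 <;> simp only [Bool.false_eq_true, reduceIte] <;>
    rw [hfe] <;> exact clamp_comm _ _ _ (by norm_num)
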